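-- pv_equiv track=rewrite | github.com/mch-sg/dtu-public | 1-semester/02002-programming/psets/2025_12_exam/navigation_tracking.py | navigation_tracking
-- ===== SOURCE A (Python) =====
-- def navigation_tracking(instructions: list[int]) -> list:
--     i = 0
--     prev = 0
--     ins = instructions
--     pos = ins[0]
--     visited = [ins[0]]
--
--     while len(ins) > 0:
--         if len(instructions) > 0:
--             i = (prev + pos) % len(instructions)
--         pos = ins[i]
--         prev = i
--         visited.append(pos)
--
--         if visited.count(pos) > ins.count(pos):
--             visited.pop()
--             break
--
--     return visited
-- ===== SOURCE B (Python) =====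
-- def navigation_tracking(instructions: list[int]) -> list:
--     n = len(instructions)
--     # Stage 1: materialize the value stream of the deterministic index walk.
--     # The next index depends only on the current index (j -> (j + instructions[j]) % n),
--     # and the stop point provably lies within the first n+1 positions (pigeonhole),
--     # so n+2 values always cover it.
--     stream = []
--     j = 0
--     for _ in range(n + 2):
--         v = instructions[j]
--         stream.append(v)
--         j = (j + v) % n
--     # Stage 2: count the instructions once.
--     total = {}
--     for x in instructions:
--         total[x] = total.get(x, 0) + 1
--     # Stage 3: prefix scan to locate the cut - the first position whose value
--     # would exceed its multiplicity in the instructions.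
--     seen = {}
--     out = []
--     for v in stream:
--         c = seen.get(v, 0) + 1
--         if c > total.get(v, 0):
--             break
--         seen[v] = c
--         out.append(v)
--     return out
-- ===== Notes on version B (the rewrite author's own statement) =====
-- stated objective: faster
-- what changed: B replaces A's single interleaved chase loop (carrying prev/pos and rescanning visited and instructions with list.count each iteration) by three staged passes: materialize the bounded index-walk value stream (the next index depends only on the current index), count the instructions once, then a single prefix scan finds the cut point.
import Mathlib
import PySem

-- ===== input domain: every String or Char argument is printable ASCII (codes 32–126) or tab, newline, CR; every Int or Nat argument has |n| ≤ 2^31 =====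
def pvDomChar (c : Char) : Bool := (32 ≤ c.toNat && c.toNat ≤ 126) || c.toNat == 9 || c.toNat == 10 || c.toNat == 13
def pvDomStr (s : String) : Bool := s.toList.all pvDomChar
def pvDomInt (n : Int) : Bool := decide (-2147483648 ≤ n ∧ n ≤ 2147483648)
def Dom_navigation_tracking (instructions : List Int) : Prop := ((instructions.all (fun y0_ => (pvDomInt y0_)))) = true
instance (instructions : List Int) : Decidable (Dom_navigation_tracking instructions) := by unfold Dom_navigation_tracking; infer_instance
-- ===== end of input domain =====

-- B replaces A's interleaved chase loop (with per-iteration list.count scans) by three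
-- staged passes: materialize the bounded index-walk value stream, count the instructions
-- once, then one prefix scan finds the cut (objective: faster).
-- Both programs terminate within instructions.length + 1 checks (the visited prefix never
-- exceeds the multiset of instructions before the cut); A's port uses that as fuel.

-- ===== PORT A =====
-- A's while loop; the `if len(instructions) > 0` guard is kept as written.
def pvLoopA (ins : List Int) : Nat → Int → Int → List Int → List Int
  | 0, _, _, visited => visited
  | fuel+1, prev, pos, visited =>
    let i := if ins.length > 0 then PySem.Int.mod (prev + pos) (ins.length : Int) else 0
    match PySem.List.pyGet? ins i with
    | none => visited  -- IndexError: unreachable for nonempty ins (mod keeps i in range)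
    | some pos' =>
      let visited' := visited ++ [pos']
      if PySem.List.count visited' pos' > PySem.List.count ins pos' then
        visited  -- append then pop: net effect
      else pvLoopA ins fuel i pos' visited'

def navigation_tracking (instructions : List Int) : List Int :=
  match PySem.List.pyGet? instructions 0 with
  | none => []  -- ins[0]: IndexError on empty input, excluded by Pre_
  | some p0 => pvLoopA instructions (instructions.length + 1) 0 p0 [p0]

-- ===== PORT B =====
-- Stage 1: the `for _ in range(n+2)` walk, as a countdown recursion over the same state.
def pvWalkB (ins : List Int) : Nat → Int → List Int → List Int
  | 0, _, stream => stream
  | k+1, j, stream =>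
    match PySem.List.pyGet? ins j with
    | none => stream  -- IndexError: unreachable for nonempty ins
    | some v => pvWalkB ins k (PySem.Int.mod (j + v) (ins.length : Int)) (stream ++ [v])

-- Stage 3: the prefix scan locating the cut.
def pvScanB (total : PySem.Dict Int Int) : List Int → PySem.Dict Int Int → List Int → List Int
  | [], _, out => out
  | v :: rest, seen, out =>
    let c := seen.getD v 0 + 1
    if c > total.getD v 0 then out
    else pvScanB total rest (seen.insert v c) (out ++ [v])

def navigation_tracking_alt (instructions : List Int) : List Int :=
  let stream := pvWalkB instructions (instructions.length + 2) 0 []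
  let total := instructions.foldl (fun d x => d.insert x (d.getD x 0 + 1)) PySem.Dict.empty
  pvScanB total stream PySem.Dict.empty []

-- ===== PRECONDITION & SPEC =====
-- Pre_ excludes only the empty list, on which both programs raise IndexError.
def Pre_navigation_tracking (instructions : List Int) : Prop := instructions ≠ []
instance (instructions : List Int) : Decidable (Pre_navigation_tracking instructions) := by
  unfold Pre_navigation_tracking; infer_instance

def pvWitness_navigation_tracking : List Int := [2, -1, 0, 2]

def Spec_navigation_tracking (instructions : List Int) (out : List Int) : Prop :=
  out = navigation_tracking_alt instructions
instance (instructions : List Int) (out : List Int) : Decidable (Spec_navigation_tracking instructions out) := by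
  unfold Spec_navigation_tracking; infer_instance

-- ===== CLAIM (what is proved, stated in full; the proofs are below) =====
def Claim_equal_navigation_tracking : Prop :=
  ∀ (instructions : List Int), Dom_navigation_tracking instructions →
    Pre_navigation_tracking instructions →
      Spec_navigation_tracking instructions (navigation_tracking instructions)

-- ===== LEMMAS AND PROOFS =====

-- The walk accumulator appends.
theorem pvWalkB_acc (ins : List Int) :
    ∀ (k : Nat) (j : Int) (s : List Int), pvWalkB ins k j s = s ++ pvWalkB ins k j [] := by
  intro k
  induction k with
  | zero => intro j s; simp [pvWalkB]
  | succ k ih =>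
    intro j s
    rw [pvWalkB, pvWalkB]
    cases hget : PySem.List.pyGet? ins j with
    | none => simp
    | some v =>
      simp only []
      rw [ih _ (s ++ [v]), ih _ ([] ++ [v])]
      simp

-- Core correspondence: A's loop from state (prev, pos) equals the scan of the walk
-- starting at index (prev+pos) % n, provided `seen` records exactly the counts of `visited`.
theorem pvLoop_eq_scan (ins : List Int) (hne : ins ≠ []) (fuel : Nat) :
    ∀ (prev pos : Int) (seen : PySem.Dict Int Int) (visited : List Int),
      (∀ x : Int, seen.getD x 0 = (visited.count x : Int)) →
      pvLoopA ins fuel prev pos visited =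
        pvScanB (PySem.Dict.counter ins)
          (pvWalkB ins fuel (PySem.Int.mod (prev + pos) (ins.length : Int)) [])
          seen visited := by
  induction fuel with
  | zero => intro prev pos seen visited _; rfl
  | succ fuel ih =>
    intro prev pos seen visited hseen
    have hlen : ins.length > 0 := List.length_pos_of_ne_nil hne
    rw [pvLoopA, pvWalkB]
    simp only [hlen, if_pos]
    cases hget : PySem.List.pyGet? ins (PySem.Int.mod (prev + pos) (ins.length : Int)) with
    | none => simp [pvScanB]
    | some pos' =>
      simp only []
      rw [pvWalkB_acc]
      simp only [List.nil_append, List.singleton_append]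
      rw [pvScanB]
      have hc : (PySem.List.count (visited ++ [pos']) pos' : Int) = seen.getD pos' 0 + 1 := by
        simp [PySem.List.count, hseen pos']
      have htot : (PySem.List.count ins pos' : Int) = (PySem.Dict.counter ins).getD pos' 0 := by
        simp [PySem.List.count, PySem.Dict.getD_counter]
      by_cases hbr : seen.getD pos' 0 + 1 > (PySem.Dict.counter ins).getD pos' 0
      · rw [if_pos (by omega), if_pos hbr]
      · rw [if_neg (by omega), if_neg hbr]
        rw [ih]
        intro x
        by_cases hx : x = pos'
        · subst hx
          rw [PySem.Dict.getD_insert_self]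
          simp [hseen x]
        · rw [PySem.Dict.getD_insert, if_neg hx]
          simp [Ne.symm hx, hseen x]

-- ===== VERDICT (by name: the statement is the Claim_ definition above) =====
theorem navigation_tracking_spec : Claim_equal_navigation_tracking := by
  intro instructions _ hpre
  unfold Spec_navigation_tracking navigation_tracking navigation_tracking_alt
  have hlen : instructions.length > 0 := List.length_pos_of_ne_nil hpre
  cases hget : PySem.List.pyGet? instructions 0 with
  | none =>
    exfalso
    rw [PySem.List.pyGet?_eq_none_iff] at hget
    exact hget (by unfold PySem.Raise.InRange; omega)
  | some p0 =>
    simp only []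
    rw [PySem.Dict.foldl_insert_getD_add_one_eq_counter]
    -- unfold the first walk step (index 0, value p0) and the first scan step
    have hwalk : pvWalkB instructions (instructions.length + 2) 0 [] =
        p0 :: pvWalkB instructions (instructions.length + 1)
          (PySem.Int.mod (0 + p0) (instructions.length : Int)) [] := by
      rw [pvWalkB]
      simp only [hget]
      rw [pvWalkB_acc]
      simp
    rw [hwalk, pvScanB]
    have hcount : (1 : Int) ≤ (PySem.Dict.counter instructions).getD p0 0 := by
      rw [PySem.Dict.getD_counter]
      have hmem : p0 ∈ instructions := by
        rw [PySem.List.pyGet?_zero] at hget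
        exact List.mem_of_getElem? hget
      have := List.count_pos_iff.mpr hmem
      exact_mod_cast this
    have hc0 : ¬ ((PySem.Dict.empty : PySem.Dict Int Int).getD p0 0 + 1 >
        (PySem.Dict.counter instructions).getD p0 0) := by
      rw [PySem.Dict.getD_empty]; omega
    rw [if_neg hc0]
    have hseen0 : ∀ x : Int,
        ((PySem.Dict.empty.insert p0 ((PySem.Dict.empty : PySem.Dict Int Int).getD p0 0 + 1)
          : PySem.Dict Int Int)).getD x 0 = (([p0] : List Int).count x : Int) := by
      intro x
      by_cases hx : x = p0
      · subst hx; rw [PySem.Dict.getD_insert_self]; simp [PySem.Dict.getD_empty]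
      · rw [PySem.Dict.getD_insert, if_neg hx, PySem.Dict.getD_empty]
        simp [Ne.symm hx]
    rw [pvLoop_eq_scan instructions hpre (instructions.length + 1) 0 p0 _ [p0] hseen0]
    simp
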